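-- pv_equiv track=rewrite | github.com/aayushkapadia/chemical_reaction_simulator | ReactionMaker/ExtraModules.py | getNameAndCoeff
-- ===== SOURCE A (Python) =====
-- def getNameAndCoeff(chemical):
-- 		i = 0
-- 		while i<len(chemical):
-- 			if chemical[i]<'0' or chemical[i]>'9':
-- 				break
-- 			i = i + 1
-- 		if i == 0:
-- 			return chemical,"1"
-- 		else:
-- 			return chemical[i:],chemical[0:i]
-- ===== SOURCE B (Python) =====
-- def getNameAndCoeff(chemical):
--     # Binary search for the longest all-digit prefix: "chemical[:i] is all
--     # digits" is monotone in i, so find the largest such i in [0, len].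
--     lo, hi = 0, len(chemical)
--     while lo < hi:
--         mid = (lo + hi + 1) // 2
--         if all('0' <= c <= '9' for c in chemical[lo:mid]):
--             lo = mid
--         else:
--             hi = mid - 1
--     if lo == 0:
--         return chemical, "1"
--     return chemical[lo:], chemical[:lo]
-- ===== Notes on version B (the rewrite author's own statement) =====
-- stated objective: alternative
-- what changed: Replaces the left-to-right index scan with a binary search for the longest all-digit prefix (the property 'chemical[:i] is all digits' is monotone in i), checking only the segment chemical[lo:mid] at each probe.
import Mathlib
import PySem

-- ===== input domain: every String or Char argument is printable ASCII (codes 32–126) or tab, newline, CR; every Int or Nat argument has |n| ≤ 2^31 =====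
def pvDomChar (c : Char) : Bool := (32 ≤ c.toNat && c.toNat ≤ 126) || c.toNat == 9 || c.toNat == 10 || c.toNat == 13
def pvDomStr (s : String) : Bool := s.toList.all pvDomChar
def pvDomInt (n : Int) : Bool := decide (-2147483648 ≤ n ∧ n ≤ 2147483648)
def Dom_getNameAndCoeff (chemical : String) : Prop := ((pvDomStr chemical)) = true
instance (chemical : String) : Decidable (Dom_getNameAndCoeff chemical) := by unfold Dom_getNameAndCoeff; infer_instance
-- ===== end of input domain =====

-- B replaces A's left-to-right index scan with a binary search for the longest
-- all-digit prefix (alternative algorithm); equal return value on all inputs.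


-- ===== PORT A =====
-- the while loop: advance i while chemical[i] is in '0'..'9', break otherwise
def gncLoopA (cs : List Char) (i : Nat) : Nat :=
  match cs with
  | [] => i
  | c :: rest => if c < '0' ∨ c > '9' then i else gncLoopA rest (i + 1)

def getNameAndCoeff (chemical : String) : String × String :=
  let cs := chemical.toList
  let i := gncLoopA cs 0
  if i = 0 then (chemical, "1")
  else (String.mk (cs.drop i), String.mk (cs.take i))

-- ===== PORT B =====
-- B's comparison '0' <= c <= '9' on one character
def digB (c : Char) : Bool := decide ('0' ≤ c ∧ c ≤ '9')

-- the binary-search loop; mid = (lo+hi+1)//2 written inline; the slice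
-- chemical[lo:mid] with 0 ≤ lo ≤ mid ≤ len is exactly (cs.drop lo).take (mid-lo)
def gncSearch (cs : List Char) (lo hi : Nat) : Nat :=
  if h : lo < hi then
    if ((cs.drop lo).take ((lo + hi + 1) / 2 - lo)).all digB then
      gncSearch cs ((lo + hi + 1) / 2) hi
    else
      gncSearch cs lo ((lo + hi + 1) / 2 - 1)
  else lo
termination_by hi - lo
decreasing_by all_goals omega

def getNameAndCoeff_alt (chemical : String) : String × String :=
  let cs := chemical.toList
  let lo := gncSearch cs 0 cs.length
  if lo = 0 then (chemical, "1")
  else (String.mk (cs.drop lo), String.mk (cs.take lo))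

-- ===== PRECONDITION & SPEC =====
def Spec_getNameAndCoeff (chemical : String) (out : String × String) : Prop := out = getNameAndCoeff_alt chemical
instance (chemical : String) (out : String × String) : Decidable (Spec_getNameAndCoeff chemical out) := by unfold Spec_getNameAndCoeff; infer_instance

-- ===== CLAIM (what is proved, stated in full; the proofs are below) =====
def Claim_equal_getNameAndCoeff : Prop := ∀ (chemical : String), Dom_getNameAndCoeff chemical → Spec_getNameAndCoeff chemical (getNameAndCoeff chemical)

-- ===== LEMMAS AND PROOFS =====

-- A's loop condition is the negation of digB
theorem breakCond_iff (c : Char) : (c < '0' ∨ c > '9') ↔ digB c = false := by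
  simp only [digB, decide_eq_false_iff_not, not_and, not_le, gt_iff_lt]
  constructor
  · intro h h0
    rcases h with h | h
    · exact absurd h0 (not_le.mpr h)
    · exact h
  · intro h
    by_cases h0 : c < '0'
    · exact Or.inl h0
    · exact Or.inr (h (not_lt.mp h0))

-- A's loop counts the takeWhile prefix
theorem gncLoopA_eq (cs : List Char) (i : Nat) :
    gncLoopA cs i = i + (cs.takeWhile digB).length := by
  induction cs generalizing i with
  | nil => simp [gncLoopA]
  | cons c rest ih =>
    rw [gncLoopA, List.takeWhile_cons]
    by_cases h : c < '0' ∨ c > '9'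
    · rw [if_pos h, (breakCond_iff c).mp h]
      simp
    · have hd : digB c = true := by
        cases hdig : digB c
        · exact absurd ((breakCond_iff c).mpr hdig) h
        · rfl
      rw [if_neg h, hd, ih]
      simp
      omega

-- every prefix of the takeWhile prefix is all-digit
theorem take_all_of_le (cs : List Char) (m : Nat)
    (hm : m ≤ (cs.takeWhile digB).length) : (cs.take m).all digB = true := by
  induction cs generalizing m with
  | nil => simp at hm; simp [hm]
  | cons c rest ih =>
    cases m with
    | zero => simp
    | succ m' =>
      by_cases h : digB c
      · rw [List.takeWhile_cons, if_pos h] at hm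
        simp only [List.length_cons, Nat.succ_le_succ_iff] at hm
        simp [h, ih m' hm]
      · rw [List.takeWhile_cons, if_neg h] at hm
        simp at hm

-- an all-digit prefix is no longer than the takeWhile prefix
theorem le_of_take_all (cs : List Char) (m : Nat) (hm : m ≤ cs.length)
    (h : (cs.take m).all digB = true) : m ≤ (cs.takeWhile digB).length := by
  induction cs generalizing m with
  | nil => simpa using hm
  | cons c rest ih =>
    cases m with
    | zero => exact Nat.zero_le _
    | succ m' =>
      simp only [List.take_succ_cons, List.all_cons, Bool.and_eq_true] at h
      rw [List.takeWhile_cons, if_pos h.1]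
      simp only [List.length_cons, Nat.succ_le_succ_iff]
      exact ih m' (by simpa using hm) h.2

-- the binary search computes the takeWhile length, given the invariant
theorem gncSearch_eq (cs : List Char) (n lo hi : Nat)
    (hfuel : hi - lo ≤ n)
    (hlo : lo ≤ (cs.takeWhile digB).length)
    (hhi : (cs.takeWhile digB).length ≤ hi)
    (hlen : hi ≤ cs.length) :
    gncSearch cs lo hi = (cs.takeWhile digB).length := by
  induction n generalizing lo hi with
  | zero =>
    rw [gncSearch, dif_neg (by omega)]
    omega
  | succ n ih =>
    rw [gncSearch]
    by_cases h : lo < hi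
    · rw [dif_pos h]
      have hb : lo < (lo + hi + 1) / 2 ∧ (lo + hi + 1) / 2 ≤ hi := by omega
      have hsplit : cs.take ((lo + hi + 1) / 2) =
          cs.take lo ++ (cs.drop lo).take ((lo + hi + 1) / 2 - lo) := by
        rw [show (lo + hi + 1) / 2 = lo + ((lo + hi + 1) / 2 - lo) from by omega,
            List.take_add, Nat.add_sub_cancel_left]
      by_cases hseg : ((cs.drop lo).take ((lo + hi + 1) / 2 - lo)).all digB = true
      · rw [if_pos hseg]
        have hall : (cs.take ((lo + hi + 1) / 2)).all digB = true := by
          rw [hsplit, List.all_append, take_all_of_le cs lo hlo, hseg]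
          rfl
        have hge : (lo + hi + 1) / 2 ≤ (cs.takeWhile digB).length :=
          le_of_take_all cs _ (by omega) hall
        exact ih ((lo + hi + 1) / 2) hi (by omega) hge hhi hlen
      · rw [if_neg hseg]
        have hlt : (cs.takeWhile digB).length < (lo + hi + 1) / 2 := by
          by_contra hge
          push_neg at hge
          apply hseg
          have hall := take_all_of_le cs ((lo + hi + 1) / 2) hge
          rw [hsplit, List.all_append, Bool.and_eq_true] at hall
          exact hall.2
        exact ih lo ((lo + hi + 1) / 2 - 1) (by omega) hlo (by omega) (by omega)
    · rw [dif_neg h]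
      omega

-- both programs compute the same split index, hence the same pair
theorem getNameAndCoeff_eq (chemical : String) :
    getNameAndCoeff chemical = getNameAndCoeff_alt chemical := by
  simp only [getNameAndCoeff, getNameAndCoeff_alt]
  rw [gncLoopA_eq, gncSearch_eq chemical.toList chemical.toList.length 0
        chemical.toList.length (by omega) (Nat.zero_le _)
        ((List.takeWhile_sublist _).length_le) (le_refl _)]
  simp

-- ===== VERDICT (by name: the statement is the Claim_ definition above) =====
theorem getNameAndCoeff_spec : Claim_equal_getNameAndCoeff := by
  intro chemical _
  exact getNameAndCoeff_eq chemical
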